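-- pv_equiv track=rewrite | github.com/dexterkwxn/news-gist | app.py | text_is_relevant
-- ===== SOURCE A (Python) =====
-- def text_is_relevant(text):
--     keywords = [
--             'carbon',
--             'methodology',
--             'sustainability',
--             'renewable',
--             'emissions',
--             'greenhouse',
--             'clean energy',
--             'sequestration',
--             'enviroment',
--             'ecological',
--             'climate',
--             'esg',
--             ]
--     for keyword in keywords:
--         for line in text:
--             if keyword in line.lower():
--                 return True
--     return False
-- ===== SOURCE B (Python) =====
-- KEYWORDS = [
--     'carbon',
--     'methodology',
--     'sustainability',
--     'renewable',
--     'emissions',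
--     'greenhouse',
--     'clean energy',
--     'sequestration',
--     'enviroment',
--     'ecological',
--     'climate',
--     'esg',
-- ]
--
-- # index the keywords by first letter once, at module load
-- _BY_FIRST = {}
-- for _kw in KEYWORDS:
--     _BY_FIRST.setdefault(_kw[0], []).append(_kw)
--
--
-- def text_is_relevant(text):
--     # single position-wise scan per line: at each character, only the keywords
--     # whose first letter matches that character are tried with startswith
--     for line in text:
--         low = line.lower()
--         for i, ch in enumerate(low):
--             for kw in _BY_FIRST.get(ch, ()):
--                 if low.startswith(kw, i):
--                     return True
--     return False
-- ===== Notes on version B (the rewrite author's own statement) =====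
-- stated objective: alternative
-- what changed: Instead of A's nested keyword-by-line substring tests (each line lowered once per keyword), B indexes the keywords by first letter in a dict built once, lowers each line once, and does a single position-wise scan of the line, trying startswith only for the keywords whose first letter matches the current character.
import Mathlib
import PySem

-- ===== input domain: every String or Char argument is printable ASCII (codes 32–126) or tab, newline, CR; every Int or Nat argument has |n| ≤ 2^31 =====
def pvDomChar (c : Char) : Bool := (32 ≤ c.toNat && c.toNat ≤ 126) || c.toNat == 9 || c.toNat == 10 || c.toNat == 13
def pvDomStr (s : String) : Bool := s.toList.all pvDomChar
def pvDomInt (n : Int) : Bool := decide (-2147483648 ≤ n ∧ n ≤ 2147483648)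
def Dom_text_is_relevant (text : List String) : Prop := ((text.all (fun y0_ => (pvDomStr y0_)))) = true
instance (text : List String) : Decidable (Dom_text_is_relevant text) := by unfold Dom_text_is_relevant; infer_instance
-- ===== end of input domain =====

-- B replaces A's nested keyword-by-line substring tests with one position-wise scan per
-- lowered line, consulting a first-letter index of the keywords (same return value, proved below).

-- ===== PORT A =====
-- A's local keyword list
def pvKeywordsA : List String :=
  ["carbon", "methodology", "sustainability", "renewable", "emissions", "greenhouse",
   "clean energy", "sequestration", "enviroment", "ecological", "climate", "esg"]

-- 'for keyword in keywords: for line in text: if keyword in line.lower(): return True' / 'return False'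
def text_is_relevant (text : List String) : Bool :=
  pvKeywordsA.any (fun keyword =>
    text.any (fun line => PySem.Str.isIn keyword (PySem.Str.lower line)))

-- ===== PORT B =====
-- B's module-level KEYWORDS
def pvKeywordsB : List String :=
  ["carbon", "methodology", "sustainability", "renewable", "emissions", "greenhouse",
   "clean energy", "sequestration", "enviroment", "ecological", "climate", "esg"]

-- _BY_FIRST: for kw in KEYWORDS: _BY_FIRST.setdefault(kw[0], []).append(kw)
-- (the key kw[0] is a one-character string in Python; ported as the Char itself)
def pvByFirst : PySem.Dict Char (List String) :=
  pvKeywordsB.foldl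
    (fun d kw => d.insert (kw.toList.headD '?') (d.getD (kw.toList.headD '?') [] ++ [kw]))
    PySem.Dict.empty

-- 'for i, ch in enumerate(low): for kw in _BY_FIRST.get(ch, ()): if low.startswith(kw, i): return True'
-- (the recursion carries the suffix low[i:]; low.startswith(kw, i) = kw prefix of that suffix)
def pvScanLine (low : List Char) : Bool :=
  match low with
  | [] => false
  | c :: rest =>
    ((pvByFirst.getD c []).any (fun kw => kw.toList.isPrefixOf (c :: rest))) || pvScanLine rest

def text_is_relevant_alt (text : List String) : Bool :=
  text.any (fun line => pvScanLine (PySem.Str.lower line).toList)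

-- ===== PRECONDITION & SPEC =====
def Spec_text_is_relevant (text : List String) (out : Bool) : Prop := out = text_is_relevant_alt text
instance (text : List String) (out : Bool) : Decidable (Spec_text_is_relevant text out) := by unfold Spec_text_is_relevant; infer_instance

-- ===== CLAIM =====
def Claim_equal_text_is_relevant : Prop := ∀ (text : List String), Dom_text_is_relevant text → Spec_text_is_relevant text (text_is_relevant text)

-- ===== LEMMAS AND PROOFS =====

-- the first-letter index holds exactly the keywords, bucketed by first character
theorem pv_bucket_spec (c : Char) (kw : String) :
    kw ∈ pvByFirst.getD c [] ↔ kw ∈ pvKeywordsB ∧ kw.toList.headD '?' = c := by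
  have hlit : pvByFirst = PySem.Dict.mk [('c', ["carbon","clean energy","climate"]),
      ('m',["methodology"]), ('s',["sustainability","sequestration"]), ('r',["renewable"]),
      ('e',["emissions","enviroment","ecological","esg"]), ('g',["greenhouse"])] := by decide
  rw [hlit]
  simp only [PySem.Dict.getD, PySem.Dict.get?_mk_cons, beq_iff_eq]
  split_ifs with h1 h2 h3 h4 h5 h6 <;>
    (try subst c) <;>
    constructor
  · intro h; fin_cases h <;> decide
  · rintro ⟨hmem, hhead⟩; fin_cases hmem <;> first | decide | exact absurd hhead (by decide)
  · intro h; fin_cases h <;> decide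
  · rintro ⟨hmem, hhead⟩; fin_cases hmem <;> first | decide | exact absurd hhead (by decide)
  · intro h; fin_cases h <;> decide
  · rintro ⟨hmem, hhead⟩; fin_cases hmem <;> first | decide | exact absurd hhead (by decide)
  · intro h; fin_cases h <;> decide
  · rintro ⟨hmem, hhead⟩; fin_cases hmem <;> first | decide | exact absurd hhead (by decide)
  · intro h; fin_cases h <;> decide
  · rintro ⟨hmem, hhead⟩; fin_cases hmem <;> first | decide | exact absurd hhead (by decide)
  · intro h; fin_cases h <;> decide
  · rintro ⟨hmem, hhead⟩; fin_cases hmem <;> first | decide | exact absurd hhead (by decide)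
  · intro h; simp [PySem.Dict.get?] at h
  · rintro ⟨hmem, hhead⟩; fin_cases hmem <;> simp_all

-- every keyword is a nonempty string
theorem pv_kw_ne_nil : ∀ kw ∈ pvKeywordsB, kw.toList ≠ [] := by decide

-- at one position, consulting only the matching bucket equals trying all keywords
theorem pv_bucket_any (c : Char) (rest : List Char) :
    ((pvByFirst.getD c []).any (fun kw => kw.toList.isPrefixOf (c :: rest)))
      = pvKeywordsB.any (fun kw => kw.toList.isPrefixOf (c :: rest)) := by
  apply Bool.eq_iff_iff.mpr
  simp only [List.any_eq_true]
  constructor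
  · rintro ⟨kw, hmem, hpre⟩
    exact ⟨kw, ((pv_bucket_spec c kw).mp hmem).1, hpre⟩
  · rintro ⟨kw, hmem, hpre⟩
    refine ⟨kw, (pv_bucket_spec c kw).mpr ⟨hmem, ?_⟩, hpre⟩
    have := List.isPrefixOf_iff_prefix.mp hpre
    rcases hl : kw.toList with _ | ⟨a, t⟩
    · exact absurd hl (pv_kw_ne_nil kw hmem)
    · rw [hl] at this
      rcases List.cons_prefix_cons.mp this with ⟨rfl, -⟩
      simp

-- the scan finds exactly the keywords occurring as an infix of the line
theorem pv_scan_spec (l : List Char) :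
    pvScanLine l = true ↔ ∃ kw ∈ pvKeywordsB, kw.toList <:+: l := by
  induction l with
  | nil =>
    simp only [pvScanLine, Bool.false_eq_true, false_iff]
    rintro ⟨kw, hmem, hinf⟩
    exact pv_kw_ne_nil kw hmem (List.eq_nil_of_infix_nil hinf)
  | cons c rest ih =>
    rw [pvScanLine, Bool.or_eq_true, pv_bucket_any, ih]
    simp only [List.any_eq_true, List.isPrefixOf_iff_prefix]
    constructor
    · rintro (⟨kw, hmem, hpre⟩ | ⟨kw, hmem, hinf⟩)
      · exact ⟨kw, hmem, hpre.isInfix⟩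
      · exact ⟨kw, hmem, List.infix_cons hinf⟩
    · rintro ⟨kw, hmem, hinf⟩
      rcases List.infix_cons_iff.mp hinf with hpre | hinf
      · exact Or.inl ⟨kw, hmem, hpre⟩
      · exact Or.inr ⟨kw, hmem, hinf⟩

-- ===== VERDICT =====
theorem text_is_relevant_spec : Claim_equal_text_is_relevant := by
  intro text _
  unfold Spec_text_is_relevant text_is_relevant text_is_relevant_alt
  apply Bool.eq_iff_iff.mpr
  simp only [List.any_eq_true, PySem.Str.isIn_iff_infix, PySem.Str.toList_lower, pv_scan_spec]
  constructor
  · rintro ⟨kw, hkw, line, hline, h⟩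
    exact ⟨line, hline, kw, hkw, by simpa [PySem.Str.toList_lower] using h⟩
  · rintro ⟨line, hline, kw, hkw, h⟩
    exact ⟨kw, hkw, line, hline, by simpa [PySem.Str.toList_lower] using h⟩
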